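-- pv_equiv track=rewrite | github.com/huhji-elha/Daily_Coding_Practice | baekjoon/2775.py | get_a_b
-- ===== SOURCE A (Python) =====
-- def get_a_b(k, n):
--     l = list(range(1, n+1))
--     l_k= []
--     kk = 0
--
--     while True:
--         if kk == k:
--             break
--         for j in range(1, n+1):
--             l_k.append(sum(l[:j]))
--         kk += 1
--         l, l_k = l_k, []
--     return l[-1]
-- ===== SOURCE B (Python) =====
-- def get_a_b(k, n):
--     # Closed form: the value at floor k, room n is the binomial coefficient
--     # C(n+k, k+1), computed as a running product with exact integer division.
--     r = 1
--     for i in range(1, k + 2):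
--         r = r * (n + i - 1) // i
--     return r
-- ===== Notes on version B (the rewrite author's own statement) =====
-- stated objective: faster
-- what changed: Replaces the k rounds of prefix-sum table rebuilding with the closed form C(n+k, k+1), evaluated as a single running product with exact integer division.
import Mathlib
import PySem

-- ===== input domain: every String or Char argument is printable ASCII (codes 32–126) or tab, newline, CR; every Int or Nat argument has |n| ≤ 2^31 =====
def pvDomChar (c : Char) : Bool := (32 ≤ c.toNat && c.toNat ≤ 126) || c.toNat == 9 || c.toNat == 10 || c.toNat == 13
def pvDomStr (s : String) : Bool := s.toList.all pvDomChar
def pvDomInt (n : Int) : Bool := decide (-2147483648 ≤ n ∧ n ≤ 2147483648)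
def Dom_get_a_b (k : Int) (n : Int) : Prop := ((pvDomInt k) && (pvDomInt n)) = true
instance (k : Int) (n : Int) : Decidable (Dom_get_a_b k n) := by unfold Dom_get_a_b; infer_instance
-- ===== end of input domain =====

-- B replaces A's k rounds of prefix-sum row rebuilding by the closed form C(n+k, k+1),
-- computed as a single running product with exact integer division (faster).

-- ===== PORT A =====
-- the inner 'for j in range(1, n+1): l_k.append(sum(l[:j]))'
def get_a_b_row (l : List Int) (n : Int) : List Int :=
  (PySem.List.pyRange 1 (n + 1) 1).foldl
    (fun l_k j => l_k ++ [(PySem.List.slice l none (some j)).sum]) []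

-- the 'while True' loop: kk counts 0,1,… up to k, so it makes exactly k.toNat rounds
-- (for k < 0 the Python loops forever; Pre_ excludes that).
def get_a_b_loop (fuel : Nat) (l : List Int) (n : Int) : List Int :=
  match fuel with
  | 0 => l
  | fuel + 1 => get_a_b_loop fuel (get_a_b_row l n) n

def get_a_b (k : Int) (n : Int) : Int :=
  PySem.List.pyGetD (get_a_b_loop k.toNat (PySem.List.pyRange 1 (n + 1) 1) n) (-1) 0

-- ===== PORT B =====
def get_a_b_alt (k : Int) (n : Int) : Int :=
  (PySem.List.pyRange 1 (k + 2) 1).foldl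
    (fun r i => PySem.Int.floordiv (r * (n + i - 1)) i) 1

-- ===== PRECONDITION & SPEC =====
-- Pre_ excludes exactly the inputs where the Python A does not return a value:
-- k < 0 (the 'while True' loop never reaches kk == k, A diverges) and n < 1
-- (the row list is empty, so l[-1] raises IndexError).
def Pre_get_a_b (k : Int) (n : Int) : Prop := 0 ≤ k ∧ 1 ≤ n
instance (k : Int) (n : Int) : Decidable (Pre_get_a_b k n) := by unfold Pre_get_a_b; infer_instance

def pvWitness_get_a_b : Int × Int := (2, 3)

def Spec_get_a_b (k : Int) (n : Int) (out : Int) : Prop := out = get_a_b_alt k n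
instance (k : Int) (n : Int) (out : Int) : Decidable (Spec_get_a_b k n out) := by unfold Spec_get_a_b; infer_instance

-- ===== CLAIM (what is proved, stated in full; the proofs are below) =====
def Claim_equal_get_a_b : Prop := ∀ (k : Int) (n : Int), Dom_get_a_b k n → Pre_get_a_b k n → Spec_get_a_b k n (get_a_b k n)

-- ===== LEMMAS AND PROOFS =====

-- closed form of A's row after kk rounds: entry at 0-based index j is C(j+kk+1, kk+1)
def pvG (kk j : Nat) : Nat := (j + kk + 1).choose (kk + 1)
def pvF (kk j : Nat) : Int := (pvG kk j : Int)

-- hockey stick: the sum of the first t entries of row kk is entry t-1 of row kk+1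
lemma pv_hockey_nat (kk : Nat) : ∀ t : Nat,
    ((List.range t).map (pvG kk)).sum = (t + kk + 1).choose (kk + 2) := by
  intro t
  induction t with
  | zero => simp
  | succ t ih =>
      rw [List.range_succ, List.map_append, List.sum_append, ih]
      simp only [List.map_cons, List.map_nil, List.sum_cons, List.sum_nil, pvG]
      have h : (t + kk + 1 + 1).choose (kk + 2)
          = (t + kk + 1).choose (kk + 1) + (t + kk + 1).choose (kk + 2) :=
        Nat.choose_succ_succ (t + kk + 1) (kk + 1)
      rw [show t + 1 + kk + 1 = t + kk + 1 + 1 from by omega, h]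
      omega

lemma pv_hockey (kk t : Nat) :
    ((List.range t).map (pvF kk)).sum = (((t + kk + 1).choose (kk + 2) : Nat) : Int) := by
  rw [← pv_hockey_nat kk t, Nat.cast_list_sum, List.map_map]
  rfl

-- the inner for-loop builds the list of prefix sums of l
lemma pv_row_eq (l : List Int) (m : Nat) :
    get_a_b_row l ((m : Int) + 1) = (List.range (m + 1)).map (fun t => (l.take (t + 1)).sum) := by
  unfold get_a_b_row
  rw [PySem.List.foldl_append_singleton_eq_map, PySem.List.pyRange_one, List.map_map]
  rw [show ((m : Int) + 1 + 1 - 1).toNat = m + 1 from by omega]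
  apply List.map_congr_left
  intro t _
  simp only [Function.comp]
  rw [PySem.List.slice_to l (show (0:Int) ≤ 1 + (t:Int) by positivity)]
  rw [show ((1:Int) + (t:Int)).toNat = t + 1 from by omega]

-- invariant of the while loop: after kk rounds the row is [pvF kk 0, …, pvF kk m]
lemma pv_loop_eq (m : Nat) (kk : Nat) :
    get_a_b_loop kk (PySem.List.pyRange 1 ((m : Int) + 1 + 1) 1) ((m : Int) + 1)
      = (List.range (m + 1)).map (pvF kk) := by
  have hstep : ∀ kk : Nat,
      get_a_b_row ((List.range (m + 1)).map (pvF kk)) ((m : Int) + 1)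
        = (List.range (m + 1)).map (pvF (kk + 1)) := by
    intro kk
    rw [pv_row_eq]
    apply List.map_congr_left
    intro t ht
    rw [List.mem_range] at ht
    rw [← List.map_take, List.take_range, min_eq_left (by omega), pv_hockey]
    simp only [pvF, pvG]
    rw [show t + (kk + 1) + 1 = t + 1 + kk + 1 from by omega,
        show (kk + 1) + 1 = kk + 2 from rfl]
  have hgen : ∀ (f kk0 : Nat),
      get_a_b_loop f ((List.range (m + 1)).map (pvF kk0)) ((m : Int) + 1)
        = (List.range (m + 1)).map (pvF (kk0 + f)) := by
    intro f
    induction f with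
    | zero => intro kk0; simp [get_a_b_loop]
    | succ f ih =>
        intro kk0
        rw [get_a_b_loop, hstep, ih, show kk0 + 1 + f = kk0 + (f + 1) from by omega]
  have h0 : PySem.List.pyRange 1 ((m : Int) + 1 + 1) 1 = (List.range (m + 1)).map (pvF 0) := by
    rw [PySem.List.pyRange_one]
    rw [show ((m : Int) + 1 + 1 - 1).toNat = m + 1 from by omega]
    apply List.map_congr_left
    intro t _
    simp [pvF, pvG, Nat.choose_one_right]
    ring
  rw [h0, hgen, Nat.zero_add]

-- B's running product computes the binomial coefficient C(m+t, t) after t steps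
lemma pv_fold_eq (m : Nat) : ∀ t : Nat,
    ((List.range t).map (fun i : Nat => (1 : Int) + (i : Int))).foldl
      (fun r i => PySem.Int.floordiv (r * ((m : Int) + 1 + i - 1)) i) 1
      = (((m + t).choose t : Nat) : Int) := by
  intro t
  induction t with
  | zero => simp
  | succ t ih =>
      rw [List.range_succ, List.map_append, List.foldl_append, ih]
      simp only [List.map_cons, List.map_nil, List.foldl_cons, List.foldl_nil]
      rw [show ((m : Int) + 1 + ((1:Int) + (t:Int)) - 1) = ((m + t + 1 : Nat) : Int) from by push_cast; ring,
          show ((1:Int) + (t:Int)) = ((t + 1 : Nat) : Int) from by push_cast; ring,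
          ← Nat.cast_mul, PySem.Int.floordiv_natCast]
      have key : (m + t).choose t * (m + t + 1) = (m + t + 1).choose (t + 1) * (t + 1) := by
        have h : (m + t + 1) * (m + t).choose t = (m + t + 1).choose (t + 1) * (t + 1) :=
          Nat.add_one_mul_choose_eq (m + t) t
        rw [Nat.mul_comm]
        exact h
      rw [key, Nat.mul_div_cancel _ (by omega),
          show m + (t + 1) = m + t + 1 from by omega]

-- ===== VERDICT (by name: the statement is the Claim_ definition above) =====
theorem get_a_b_spec : Claim_equal_get_a_b := by
  intro k n _ hpre
  obtain ⟨hk, hn⟩ := hpre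
  obtain ⟨kk, rfl⟩ : ∃ kk : Nat, k = (kk : Int) := ⟨k.toNat, by omega⟩
  obtain ⟨m, rfl⟩ : ∃ m : Nat, n = (m : Int) + 1 := ⟨(n - 1).toNat, by omega⟩
  show get_a_b _ _ = _
  unfold get_a_b
  rw [Int.toNat_natCast, pv_loop_eq]
  have hlast : PySem.List.pyGetD ((List.range (m + 1)).map (pvF kk)) (-1) 0 = pvF kk m := by
    rw [PySem.List.pyGetD_neg_one ((List.range (m + 1)).map (pvF kk)) 0 (by simp)]
    rw [List.getLast_eq_getElem]
    simp
  rw [hlast]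
  unfold get_a_b_alt
  rw [PySem.List.pyRange_one]
  rw [show ((kk : Int) + 2 - 1).toNat = kk + 1 from by omega]
  rw [pv_fold_eq m (kk + 1)]
  simp only [pvF, pvG]
  rw [show m + kk + 1 = m + (kk + 1) from by omega]
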